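-- pv_equiv track=rewrite | github.com/mihiarc/pyfia | src/pyfia/estimation/pipeline/optimizer.py | _operations_related
-- ===== SOURCE A (Python) =====
-- def _operations_related(op1: str, op2: str) -> bool:
--     """Check if two operations are related."""
--     # Group similar operations
--     operation_groups = [
--         ["filter", "select", "where"],
--         ["join", "merge", "combine"],
--         ["aggregate", "group", "summarize"],
--         ["calculate", "compute", "transform"]
--     ]
--
--     for group in operation_groups:
--         if any(g in op1 for g in group) and any(g in op2 for g in group):
--             return True
--
--     return False
-- ===== SOURCE B (Python) =====
-- # Flat keyword -> group-bit table; one simultaneous pass builds two integer bitmasks.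
-- _KEYWORD_BITS = (
--     ("filter", 1), ("select", 1), ("where", 1),
--     ("join", 2), ("merge", 2), ("combine", 2),
--     ("aggregate", 4), ("group", 4), ("summarize", 4),
--     ("calculate", 8), ("compute", 8), ("transform", 8),
-- )
--
--
-- def _operations_related(op1: str, op2: str) -> bool:
--     """Check if two operations are related."""
--     m1 = 0
--     m2 = 0
--     for kw, bit in _KEYWORD_BITS:
--         if kw in op1:
--             m1 |= bit
--         if kw in op2:
--             m2 |= bit
--     return (m1 & m2) != 0
-- ===== Notes on version B (the rewrite author's own statement) =====
-- stated objective: alternative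
-- what changed: B replaces A's nested loop over groups (check both ops per group, return on first joint hit) with a single flat pass over a keyword-to-group-bit table that maintains two integer bitmasks for both arguments simultaneously; relatedness is decided by one integer AND at the end.
import Mathlib
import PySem

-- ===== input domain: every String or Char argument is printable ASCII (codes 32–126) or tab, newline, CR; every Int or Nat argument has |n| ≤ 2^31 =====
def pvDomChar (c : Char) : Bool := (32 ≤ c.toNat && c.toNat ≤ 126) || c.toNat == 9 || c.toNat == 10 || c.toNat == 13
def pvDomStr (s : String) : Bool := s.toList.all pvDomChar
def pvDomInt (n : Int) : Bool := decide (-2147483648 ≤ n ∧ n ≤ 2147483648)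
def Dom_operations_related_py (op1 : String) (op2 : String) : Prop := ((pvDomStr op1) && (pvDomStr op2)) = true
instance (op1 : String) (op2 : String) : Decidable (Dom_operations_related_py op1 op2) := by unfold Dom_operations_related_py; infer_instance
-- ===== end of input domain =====

-- B replaces A's nested group loop with one flat pass over a keyword->bit table building two integer bitmasks, combined by an integer AND (alternative decomposition, same cost).


-- ===== PORT A =====
-- A's literal: the four operation groups
def pvGroups : List (List String) :=
  [["filter", "select", "where"],
   ["join", "merge", "combine"],
   ["aggregate", "group", "summarize"],
   ["calculate", "compute", "transform"]]

-- A: loop over the groups, True on the first group matching BOTH ops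
def operations_related_py (op1 : String) (op2 : String) : Bool :=
  pvGroups.any (fun group =>
    group.any (fun g => PySem.Str.isIn g op1) && group.any (fun g => PySem.Str.isIn g op2))

-- ===== PORT B =====
-- B's literal: flat keyword -> group-bit table
def pvKeywordBits : List (String × Int) :=
  [("filter", 1), ("select", 1), ("where", 1),
   ("join", 2), ("merge", 2), ("combine", 2),
   ("aggregate", 4), ("group", 4), ("summarize", 4),
   ("calculate", 8), ("compute", 8), ("transform", 8)]

-- B: single pass accumulating two bitmasks, then an integer AND
def operations_related_py_alt (op1 : String) (op2 : String) : Bool :=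
  let p : Int × Int := pvKeywordBits.foldl
    (fun (m : Int × Int) (kb : String × Int) =>
      ((if PySem.Str.isIn kb.1 op1 then Int.lor m.1 kb.2 else m.1),
       (if PySem.Str.isIn kb.1 op2 then Int.lor m.2 kb.2 else m.2)))
    (0, 0)
  decide (Int.land p.1 p.2 ≠ 0)

-- ===== PRECONDITION & SPEC =====
def Spec_operations_related_py (op1 : String) (op2 : String) (out : Bool) : Prop := out = operations_related_py_alt op1 op2
instance (op1 : String) (op2 : String) (out : Bool) : Decidable (Spec_operations_related_py op1 op2 out) := by unfold Spec_operations_related_py; infer_instance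

-- ===== CLAIM (what is proved, stated in full; the proofs are below) =====
def Claim_equal_operations_related_py : Prop := ∀ (op1 : String) (op2 : String), Dom_operations_related_py op1 op2 → Spec_operations_related_py op1 op2 (operations_related_py op1 op2)

-- ===== LEMMAS AND PROOFS =====

-- the per-op bitmask fold, isolated for the proof
def pvMaskFold (op : String) : Int :=
  pvKeywordBits.foldl (fun (m : Int) (kb : String × Int) =>
    if PySem.Str.isIn kb.1 op then Int.lor m kb.2 else m) 0

-- a fold with componentwise-independent pair updates splits into two folds
theorem pv_foldl_prod {α β γ : Type} (f : α → γ → α) (g : β → γ → β)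
    (l : List γ) (a : α) (b : β) :
    l.foldl (fun p c => (f p.1 c, g p.2 c)) (a, b) = (l.foldl f a, l.foldl g b) := by
  induction l generalizing a b with
  | nil => rfl
  | cons x xs ih => simp [List.foldl, ih]

-- the fold's mask, expressed through the four group-hit booleans
theorem pv_mask_eq (op : String) :
    pvMaskFold op =
      Int.lor (Int.lor (Int.lor
        (if PySem.Str.isIn "filter" op || (PySem.Str.isIn "select" op || PySem.Str.isIn "where" op) then (1:Int) else 0)
        (if PySem.Str.isIn "join" op || (PySem.Str.isIn "merge" op || PySem.Str.isIn "combine" op) then (2:Int) else 0))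
        (if PySem.Str.isIn "aggregate" op || (PySem.Str.isIn "group" op || PySem.Str.isIn "summarize" op) then (4:Int) else 0))
        (if PySem.Str.isIn "calculate" op || (PySem.Str.isIn "compute" op || PySem.Str.isIn "transform" op) then (8:Int) else 0) := by
  unfold pvMaskFold pvKeywordBits
  simp only [List.foldl]
  generalize PySem.Str.isIn "filter" op = x1
  generalize PySem.Str.isIn "select" op = x2
  generalize PySem.Str.isIn "where" op = x3
  generalize PySem.Str.isIn "join" op = x4
  generalize PySem.Str.isIn "merge" op = x5
  generalize PySem.Str.isIn "combine" op = x6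
  generalize PySem.Str.isIn "aggregate" op = x7
  generalize PySem.Str.isIn "group" op = x8
  generalize PySem.Str.isIn "summarize" op = x9
  generalize PySem.Str.isIn "calculate" op = x10
  generalize PySem.Str.isIn "compute" op = x11
  generalize PySem.Str.isIn "transform" op = x12
  revert x1 x2 x3 x4 x5 x6 x7 x8 x9 x10 x11 x12
  decide

-- ===== VERDICT (by name: the statement is the Claim_ definition above) =====
theorem operations_related_py_spec : Claim_equal_operations_related_py := by
  intro op1 op2 _
  unfold Spec_operations_related_py operations_related_py operations_related_py_alt
  rw [pv_foldl_prod
        (fun (m : Int) (kb : String × Int) => if PySem.Str.isIn kb.1 op1 then Int.lor m kb.2 else m)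
        (fun (m : Int) (kb : String × Int) => if PySem.Str.isIn kb.1 op2 then Int.lor m kb.2 else m)]
  rw [show pvKeywordBits.foldl (fun (m : Int) (kb : String × Int) => if PySem.Str.isIn kb.1 op1 then Int.lor m kb.2 else m) 0 = pvMaskFold op1 from rfl]
  rw [show pvKeywordBits.foldl (fun (m : Int) (kb : String × Int) => if PySem.Str.isIn kb.1 op2 then Int.lor m kb.2 else m) 0 = pvMaskFold op2 from rfl]
  rw [pv_mask_eq op1, pv_mask_eq op2]
  unfold pvGroups
  simp only [List.any_cons, List.any_nil, Bool.or_false]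
  generalize (PySem.Str.isIn "filter" op1 || (PySem.Str.isIn "select" op1 || PySem.Str.isIn "where" op1)) = a0
  generalize (PySem.Str.isIn "join" op1 || (PySem.Str.isIn "merge" op1 || PySem.Str.isIn "combine" op1)) = a1
  generalize (PySem.Str.isIn "aggregate" op1 || (PySem.Str.isIn "group" op1 || PySem.Str.isIn "summarize" op1)) = a2
  generalize (PySem.Str.isIn "calculate" op1 || (PySem.Str.isIn "compute" op1 || PySem.Str.isIn "transform" op1)) = a3
  generalize (PySem.Str.isIn "filter" op2 || (PySem.Str.isIn "select" op2 || PySem.Str.isIn "where" op2)) = b0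
  generalize (PySem.Str.isIn "join" op2 || (PySem.Str.isIn "merge" op2 || PySem.Str.isIn "combine" op2)) = b1
  generalize (PySem.Str.isIn "aggregate" op2 || (PySem.Str.isIn "group" op2 || PySem.Str.isIn "summarize" op2)) = b2
  generalize (PySem.Str.isIn "calculate" op2 || (PySem.Str.isIn "compute" op2 || PySem.Str.isIn "transform" op2)) = b3
  revert a0 a1 a2 a3 b0 b1 b2 b3
  decide
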